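-- pv_equiv track=rewrite | github.com/AliceSeo/preparationForCodingCompetition | sugar_delivery.py | getAllCombination
-- ===== SOURCE A (Python) =====
-- def getAllCombination(n):
--     combination_list = []
--     a = 0
--     while (n - 5 * a) >= 0:
--         if (n - 5 * a) % 3 == 0:
--             combination_list += [a + ((n - 5 * a) // 3)]
--         a += 1
--     return combination_list
-- ===== SOURCE B (Python) =====
-- def getAllCombination(n):
--     a0 = (2 * n) % 3
--     if 5 * a0 > n:
--         return []
--     count = (n - 5 * a0) // 15 + 1
--     first = (n - 2 * a0) // 3
--     return [first - 2 * i for i in range(count)]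
-- ===== Notes on version B (the rewrite author's own statement) =====
-- stated objective: faster
-- what changed: B replaces A's per-candidate scan (trying every a with 5a<=n and testing divisibility) by a closed form: the valid a form an arithmetic progression starting at (2n)%3 with step 3, so B computes the term count and first value directly and emits the progression.
import Mathlib
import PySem

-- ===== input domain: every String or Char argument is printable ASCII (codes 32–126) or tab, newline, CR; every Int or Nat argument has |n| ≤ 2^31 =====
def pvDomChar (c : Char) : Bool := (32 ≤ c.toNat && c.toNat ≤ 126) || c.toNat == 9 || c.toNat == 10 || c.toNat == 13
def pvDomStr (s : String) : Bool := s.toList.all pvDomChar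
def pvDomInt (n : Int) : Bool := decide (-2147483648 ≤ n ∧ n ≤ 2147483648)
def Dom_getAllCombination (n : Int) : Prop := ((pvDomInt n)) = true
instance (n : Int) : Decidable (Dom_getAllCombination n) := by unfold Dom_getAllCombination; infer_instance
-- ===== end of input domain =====

-- B replaces A's per-candidate scan by the closed-form arithmetic progression of answers (objective: faster, constant-factor).

-- ===== PORT A =====
-- the while loop of A, carrying the accumulator combination_list
def pvLoopA (n a : Int) (acc : List Int) : List Int :=
  if _h : n - 5 * a ≥ 0 then
    pvLoopA n (a + 1)
      (if PySem.Int.mod (n - 5 * a) 3 = 0 then acc ++ [a + PySem.Int.floordiv (n - 5 * a) 3] else acc)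
  else acc
termination_by (n - 5 * a + 1).toNat
decreasing_by omega

def getAllCombination (n : Int) : List Int := pvLoopA n 0 []

-- ===== PORT B =====
def getAllCombination_alt (n : Int) : List Int :=
  let a0 := PySem.Int.mod (2 * n) 3
  if 5 * a0 > n then []
  else
    let count := PySem.Int.floordiv (n - 5 * a0) 15 + 1
    let first := PySem.Int.floordiv (n - 2 * a0) 3
    (PySem.List.pyRange 0 count 1).map (fun i => first - 2 * i)

-- ===== PRECONDITION & SPEC =====
def Spec_getAllCombination (n : Int) (out : List Int) : Prop := out = getAllCombination_alt n
instance (n : Int) (out : List Int) : Decidable (Spec_getAllCombination n out) := by unfold Spec_getAllCombination; infer_instance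

-- ===== CLAIM (what is proved, stated in full; the proofs are below) =====
def Claim_equal_getAllCombination : Prop := ∀ (n : Int), Dom_getAllCombination n → Spec_getAllCombination n (getAllCombination n)

-- ===== LEMMAS AND PROOFS =====

theorem pvMod3 (a : Int) : PySem.Int.mod a 3 = a % 3 :=
  PySem.Int.mod_eq_emod_of_pos (by norm_num)

theorem pvDiv3 (a : Int) : PySem.Int.floordiv a 3 = a / 3 :=
  PySem.Int.floordiv_eq_ediv_of_pos (by norm_num)

theorem pvDiv15 (a : Int) : PySem.Int.floordiv a 15 = a / 15 :=
  PySem.Int.floordiv_eq_ediv_of_pos (by norm_num)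

theorem loopA_neg (n a : Int) (acc : List Int) (h : n - 5 * a < 0) :
    pvLoopA n a acc = acc := by
  rw [pvLoopA, dif_neg (by omega)]

theorem loopA_acc : ∀ (k : Nat) (n a : Int) (acc : List Int),
    (n - 5 * a + 1).toNat ≤ k → pvLoopA n a acc = acc ++ pvLoopA n a [] := by
  intro k
  induction k with
  | zero =>
    intro n a acc hk
    rw [loopA_neg n a acc (by omega), loopA_neg n a [] (by omega), List.append_nil]
  | succ k ih =>
    intro n a acc hk
    by_cases h : n - 5 * a ≥ 0
    · rw [pvLoopA, dif_pos h]
      conv_rhs => rw [pvLoopA, dif_pos h]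
      by_cases hm : PySem.Int.mod (n - 5 * a) 3 = 0
      · rw [if_pos hm, if_pos hm]
        conv_lhs => rw [ih n (a + 1) _ (by omega)]
        conv_rhs => rw [ih n (a + 1) _ (by omega)]
        simp
      · rw [if_neg hm, if_neg hm]
        conv_lhs => rw [ih n (a + 1) _ (by omega)]
    · rw [loopA_neg n a acc (by omega), loopA_neg n a [] (by omega), List.append_nil]

theorem loopA_skip (n a : Int) (h : 0 ≤ n - 5 * a) (hm : (n - 5 * a) % 3 ≠ 0) :
    pvLoopA n a [] = pvLoopA n (a + 1) [] := by
  rw [pvLoopA, dif_pos (by omega), if_neg (by rw [pvMod3]; exact hm)]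

theorem loopA_hit (n a : Int) (h : 0 ≤ n - 5 * a) (hm : (n - 5 * a) % 3 = 0) :
    pvLoopA n a [] = (a + (n - 5 * a) / 3) :: pvLoopA n (a + 1) [] := by
  rw [pvLoopA, dif_pos (by omega), if_pos (by rw [pvMod3]; exact hm)]
  rw [loopA_acc (n - 5 * (a + 1) + 1).toNat n (a + 1) _ (le_refl _)]
  simp only [pvDiv3, List.nil_append, List.singleton_append]


-- stop lemma: from a with (n-5a)%3 = 1 or 2 and n-5a < 10 resp. 5, the loop adds nothing more
theorem loopA_tail_nil (n a : Int) (h15 : n - 5 * a < 15) (hm : (n - 5 * a) % 3 = 0) :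
    pvLoopA n (a + 1) [] = [] := by
  have e2 : a + 1 + 1 = a + 2 := by ring
  have e3 : a + 2 + 1 = a + 3 := by ring
  by_cases h1 : 0 ≤ n - 5 * (a + 1)
  · rw [loopA_skip n (a + 1) h1 (by omega), e2]
    by_cases h2 : 0 ≤ n - 5 * (a + 2)
    · rw [loopA_skip n (a + 2) h2 (by omega), e3]
      exact loopA_neg n (a + 3) [] (by omega)
    · exact loopA_neg n (a + 2) [] (by omega)
  · exact loopA_neg n (a + 1) [] (by omega)

theorem loopA_closed : ∀ (k : Nat) (n a : Int),
    (n - 5 * a + 1).toNat ≤ k → 0 ≤ n - 5 * a → (n - 5 * a) % 3 = 0 →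
    pvLoopA n a [] =
      (List.range ((n - 5 * a) / 15 + 1).toNat).map (fun (i : Nat) => (n - 2 * a) / 3 - 2 * (i : Int)) := by
  intro k
  induction k with
  | zero => intro n a hk h0 _; omega
  | succ k ih =>
    intro n a hk h0 hm
    rw [loopA_hit n a h0 hm]
    by_cases h15 : n - 5 * a < 15
    · rw [loopA_tail_nil n a h15 hm]
      have hc : (n - 5 * a) / 15 = 0 := by omega
      have hv : a + (n - 5 * a) / 3 = (n - 2 * a) / 3 := by omega
      rw [hc, hv]
      norm_num
    · have e2 : a + 1 + 1 = a + 2 := by ring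
      have e3 : a + 2 + 1 = a + 3 := by ring
      rw [loopA_skip n (a + 1) (by omega) (by omega), e2,
          loopA_skip n (a + 2) (by omega) (by omega), e3]
      rw [ih n (a + 3) (by omega) (by omega) (by omega)]
      have hc : (n - 5 * (a + 3)) / 15 + 1 = (n - 5 * a) / 15 := by omega
      have hcpos : 1 ≤ (n - 5 * a) / 15 := by omega
      have hct : ((n - 5 * a) / 15 + 1).toNat = ((n - 5 * a) / 15).toNat + 1 := by omega
      rw [hc, hct, List.range_succ_eq_map, List.map_cons, List.map_map]
      have hv : a + (n - 5 * a) / 3 = (n - 2 * a) / 3 - 2 * ((0 : Nat) : Int) := by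
        push_cast; omega
      rw [hv]
      congr 1
      apply List.map_congr_left
      intro i _
      simp only [Function.comp_apply]
      have h6 : (n - 2 * (a + 3)) / 3 = (n - 2 * a) / 3 - 2 := by omega
      rw [h6]
      push_cast [Nat.succ_eq_add_one]; ring

-- ===== VERDICT (by name: the statement is the Claim_ definition above) =====
theorem getAllCombination_spec : Claim_equal_getAllCombination := by
  intro n _
  unfold Spec_getAllCombination getAllCombination getAllCombination_alt
  simp only [pvMod3, pvDiv3, pvDiv15]
  set r := (2 * n) % 3 with hr
  obtain ⟨hrl, hrh⟩ : 0 ≤ r ∧ r < 3 := ⟨Int.emod_nonneg _ (by norm_num), Int.emod_lt_of_pos _ (by norm_num)⟩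
  by_cases hg : 5 * r > n
  · rw [if_pos hg]
    by_cases hn : n < 0
    · exact loopA_neg n 0 [] (by omega)
    · -- 0 ≤ n and 5r > n: r = 1 (then n < 5, n%3 = 2) or r = 2 (then n < 10, n%3 = 1)
      interval_cases r
      · omega
      · rw [loopA_skip n 0 (by omega) (by omega)]
        exact loopA_neg n (0 + 1) [] (by omega)
      · rw [loopA_skip n 0 (by omega) (by omega)]
        by_cases h5 : 0 ≤ n - 5 * (0 + 1)
        · rw [loopA_skip n (0 + 1) h5 (by omega)]
          exact loopA_neg n (0 + 1 + 1) [] (by omega)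
        · exact loopA_neg n (0 + 1) [] (by omega)
  · rw [if_neg hg]
    have hle : 5 * r ≤ n := by omega
    have hmain : pvLoopA n r [] =
        (List.range ((n - 5 * r) / 15 + 1).toNat).map (fun (i : Nat) => (n - 2 * r) / 3 - 2 * (i : Int)) :=
      loopA_closed (n - 5 * r + 1).toNat n r (le_refl _) (by omega) (by omega)
    have hreach : pvLoopA n 0 [] = pvLoopA n r [] := by
      interval_cases r
      · rfl
      · rw [loopA_skip n 0 (by omega) (by omega)]
        norm_num
      · rw [loopA_skip n 0 (by omega) (by omega), loopA_skip n (0 + 1) (by omega) (by omega)]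
        norm_num
    rw [hreach, hmain, PySem.List.pyRange_one, List.map_map]
    have hrng : ((n - 5 * r) / 15 + 1 - 0).toNat = ((n - 5 * r) / 15 + 1).toNat := by omega
    rw [hrng]
    apply List.map_congr_left
    intro i _
    simp
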